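-- pv_equiv track=rewrite | github.com/AdityaJain1030/K4-free-graph-constructions | axplorer/src/envs/kfour.py | _find_all_kt
-- ===== SOURCE A (Python) =====
-- def _find_all_kt(t: int, nbr: list, N: int) -> list:
--     """Return all K_t cliques as sorted t-tuples of vertex indices."""
--     result = []
--
--     def collect(size, path, candidates):
--         if size == 0:
--             result.append(tuple(path))
--             return
--         tmp = candidates
--         while tmp:
--             lsb = tmp & -tmp
--             v = lsb.bit_length() - 1
--             tmp ^= lsb
--             collect(size - 1, path + [v], nbr[v] & tmp)
--
--     collect(t, [], (1 << N) - 1)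
--     return result
-- ===== SOURCE B (Python) =====
-- from itertools import combinations
--
--
-- def _find_all_kt(t: int, nbr: list, N: int) -> list:
--     """Return all K_t cliques as sorted t-tuples of vertex indices."""
--     if t > N:
--         return []
--     result = []
--     for combo in combinations(range(N), t):
--         if all((nbr[a] >> b) & 1 for i, a in enumerate(combo) for b in combo[i + 1:]):
--             result.append(combo)
--     return result
-- ===== Notes on version B (the rewrite author's own statement) =====
-- stated objective: simpler
-- what changed: Replaces A's recursive pruned-bitmask DFS (explicit lowest-set-bit extraction and shrinking candidate masks) with a flat generate-and-test: itertools.combinations(range(N), t) yields each ascending t-tuple in the same lexicographic order and a single all() pairwise adjacency check ((nbr[a] >> b) & 1) keeps it.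
-- outside the precondition, e.g. on _find_all_kt(-1, [], 0): A returns [], B raises ValueError
import Mathlib
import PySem

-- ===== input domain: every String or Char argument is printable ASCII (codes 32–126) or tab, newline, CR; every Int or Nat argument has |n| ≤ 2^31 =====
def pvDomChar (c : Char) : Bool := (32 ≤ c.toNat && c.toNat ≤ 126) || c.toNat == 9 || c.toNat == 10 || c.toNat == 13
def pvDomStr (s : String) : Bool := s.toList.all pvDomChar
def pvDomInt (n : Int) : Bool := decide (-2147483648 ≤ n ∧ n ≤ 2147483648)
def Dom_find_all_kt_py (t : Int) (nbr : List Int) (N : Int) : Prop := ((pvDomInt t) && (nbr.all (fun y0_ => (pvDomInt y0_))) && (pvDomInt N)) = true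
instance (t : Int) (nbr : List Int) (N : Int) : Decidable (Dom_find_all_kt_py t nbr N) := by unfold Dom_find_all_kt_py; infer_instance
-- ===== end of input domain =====

-- B replaces A's recursive pruned-bitmask DFS by a flat generate-and-test over ascending
-- t-combinations with a pairwise adjacency check (objective: simpler); equal output on Pre_.

-- ===== PORT A =====
-- (the two pv_* theorems below are cited by the port's decreasing_by)

-- termination helpers
theorem pv_land_toNat_le (a : Int) (b : Nat) : (Int.land a (b : Int)).toNat ≤ b := by
  cases a with
  | ofNat m => simpa [Int.land] using Nat.and_le_right
  | negSucc m =>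
      show Nat.ldiff b m ≤ b
      exact Nat.le_of_testBit fun i hi => by
        rw [Nat.testBit_ldiff] at hi; exact Bool.and_elim_left hi

theorem pv_ldiff_pred : ∀ tmp : Nat, tmp ≠ 0 →
    ∃ k, Nat.ldiff tmp (tmp - 1) = 2 ^ k ∧ tmp.testBit k = true ∧ ∀ j < k, tmp.testBit j = false := by
  intro tmp
  induction tmp using Nat.strong_induction_on with
  | _ tmp IH =>
    intro h
    rcases Nat.even_or_odd tmp with he | ho
    · obtain ⟨a, ha⟩ := he
      have ha2 : tmp = 2 * a := by omega
      have ha0 : a ≠ 0 := by omega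
      obtain ⟨k, hk, hb, hlow⟩ := IH a (by omega) ha0
      refine ⟨k + 1, ?_, ?_, ?_⟩
      · apply Nat.eq_of_testBit_eq
        intro i
        cases i with
        | zero =>
            have e0 : tmp % 2 = 0 := by omega
            rw [Nat.testBit_ldiff]
            simp [Nat.testBit_zero, e0]
        | succ i =>
            have e1 : tmp / 2 = a := by omega
            have e2 : (tmp - 1) / 2 = a - 1 := by omega
            have hthis := congrArg (fun x => x.testBit i) hk
            simp only [Nat.testBit_ldiff] at hthis
            have e3 : (2 : Nat) ^ (k + 1) / 2 = 2 ^ k := by rw [pow_succ]; omega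
            rw [Nat.testBit_ldiff]
            simp only [Nat.testBit_add_one, e1, e2, e3]
            exact hthis
      · have e1 : tmp / 2 = a := by omega
        simp [Nat.testBit_add_one, e1, hb]
      · intro j hj
        cases j with
        | zero =>
            have e0 : tmp % 2 = 0 := by omega
            simp [Nat.testBit_zero, e0]
        | succ j =>
            have e1 : tmp / 2 = a := by omega
            simp [Nat.testBit_add_one, e1, hlow j (by omega)]
    · obtain ⟨a, ha⟩ := ho
      refine ⟨0, ?_, ?_, ?_⟩
      · apply Nat.eq_of_testBit_eq
        intro i
        cases i with
        | zero =>
            have e0 : tmp % 2 = 1 := by omega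
            have e1 : (tmp - 1) % 2 = 0 := by omega
            rw [Nat.testBit_ldiff]
            simp [Nat.testBit_zero, e0, e1]
        | succ i =>
            have e : tmp / 2 = (tmp - 1) / 2 := by omega
            rw [Nat.testBit_ldiff]
            simp [Nat.testBit_add_one, e]
      · simp [Nat.testBit_zero]; omega
      · intro j hj; omega

theorem pv_lsb_spec (tmp : Nat) (h : tmp ≠ 0) :
    ∃ k, (Int.land (tmp : Int) (-(tmp : Int))).toNat = 2 ^ k ∧ tmp.testBit k = true ∧
      ∀ j < k, tmp.testBit j = false := by
  obtain ⟨m, rfl⟩ := Nat.exists_eq_succ_of_ne_zero h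
  have hneg : -((m + 1 : Nat) : Int) = Int.negSucc m := by
    rw [Int.negSucc_eq]; push_cast; ring
  rw [hneg]
  have : Int.land ((m + 1 : Nat) : Int) (Int.negSucc m) = Int.ofNat (Nat.ldiff (m + 1) m) := rfl
  rw [this]
  simpa using pv_ldiff_pred (m + 1) (Nat.succ_ne_zero m)

theorem pv_xor_lsb_lt (tmp : Nat) (h : ¬ tmp = 0) :
    tmp ^^^ (Int.land (tmp : Int) (-(tmp : Int))).toNat < tmp := by
  obtain ⟨k, hm, hb, hlow⟩ := pv_lsb_spec tmp h
  rw [hm]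
  apply Nat.lt_of_testBit k
  · simp [Nat.testBit_xor, hb]
  · exact hb
  · intro j hj
    simp [Nat.testBit_xor, Nat.ne_of_lt hj]

def pyBitLength (n : Nat) : Nat := if n = 0 then 0 else Nat.log2 n + 1

mutual
def collectA (nbr : List Int) (size : Int) (path : List Int) (cand : Nat) : List (List Int) :=
  if size = 0 then [path] else loopA nbr size path cand
termination_by 2 * cand + 1
decreasing_by omega

def loopA (nbr : List Int) (size : Int) (path : List Int) (tmp : Nat) : List (List Int) :=
  if _h : tmp = 0 then []
  else
    let lsb : Nat := (Int.land (tmp : Int) (-(tmp : Int))).toNat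
    let v : Nat := pyBitLength lsb - 1
    let tmp' : Nat := tmp ^^^ lsb
    collectA nbr (size - 1) (path ++ [(v : Int)])
        (Int.land ((PySem.List.pyGet? nbr (v : Int)).getD 0) (tmp' : Int)).toNat
      ++ loopA nbr size path tmp'
termination_by 2 * tmp
decreasing_by
  · have h1 := pv_xor_lsb_lt tmp _h
    have h2 := pv_land_toNat_le ((PySem.List.pyGet? nbr ((pyBitLength (Int.land (tmp : Int) (-(tmp : Int))).toNat - 1 : Nat) : Int)).getD 0) (tmp ^^^ (Int.land (tmp : Int) (-(tmp : Int))).toNat)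
    omega
  · have h1 := pv_xor_lsb_lt tmp _h
    omega
end

def find_all_kt_py (t : Int) (nbr : List Int) (N : Int) : List (List Int) :=
  collectA nbr t [] (2 ^ N.toNat - 1)

-- ===== PORT B =====
-- Python `(x >> b) & 1` used as a truth value; exact for b ≥ 0 (b is a vertex index ≥ 0 here)
def pyBitTest (x : Int) (b : Int) : Bool := Int.land (x >>> b.toNat) 1 == 1

-- port of `all((nbr[a] >> b) & 1 for i, a in enumerate(combo) for b in combo[i+1:])`
def pairsOkB (nbr : List Int) : List Int → Bool
  | [] => true
  | a :: rest => (rest.all fun b => pyBitTest ((PySem.List.pyGet? nbr a).getD 0) b) && pairsOkB nbr rest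

-- port of itertools.combinations(l, k): ascending k-tuples in lexicographic order
def combosB : Nat → List Int → List (List Int)
  | 0, _ => [[]]
  | _ + 1, [] => []
  | k + 1, x :: xs => ((combosB k xs).map fun c => x :: c) ++ combosB (k + 1) xs

def find_all_kt_py_alt (t : Int) (nbr : List Int) (N : Int) : List (List Int) :=
  if N < t then []
  else (combosB t.toNat (PySem.List.pyRange 0 N 1)).filter fun c => pairsOkB nbr c

-- ===== PRECONDITION & SPEC =====
-- Pre_ excludes negative t, on which A vacuously returns [] while B's combinations(range(N), t)
-- raises ValueError; and the inputs where A raises: N < 0 (ValueError on 1 << N) and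
-- t ≥ 1 with N > len(nbr) (IndexError on nbr[v]).
def Pre_find_all_kt_py (t : Int) (nbr : List Int) (N : Int) : Prop :=
  0 ≤ t ∧ 0 ≤ N ∧ (t = 0 ∨ N ≤ (nbr.length : Int))
instance (t : Int) (nbr : List Int) (N : Int) : Decidable (Pre_find_all_kt_py t nbr N) := by
  unfold Pre_find_all_kt_py; infer_instance

def pvWitness_find_all_kt_py : Int × List Int × Int := (2, [6, 5, 3], 3)

def Spec_find_all_kt_py (t : Int) (nbr : List Int) (N : Int) (out : List (List Int)) : Prop := out = find_all_kt_py_alt t nbr N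
instance (t : Int) (nbr : List Int) (N : Int) (out : List (List Int)) : Decidable (Spec_find_all_kt_py t nbr N out) := by unfold Spec_find_all_kt_py; infer_instance

-- ===== CLAIM (what is proved, stated in full; the proofs are below) =====
def Claim_equal_find_all_kt_py : Prop := ∀ (t : Int) (nbr : List Int) (N : Int), Dom_find_all_kt_py t nbr N → Pre_find_all_kt_py t nbr N → Spec_find_all_kt_py t nbr N (find_all_kt_py t nbr N)

-- ===== LEMMAS AND PROOFS =====

-- the ascending list of set-bit positions of a natural number
def bitsOf (n : Nat) : List Nat := (List.range n).filter n.testBit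

def bitsI (n : Nat) : List Int := (bitsOf n).map fun k : Nat => (k : Int)

theorem mem_bitsOf {n i : Nat} : i ∈ bitsOf n ↔ n.testBit i = true := by
  unfold bitsOf
  simp only [List.mem_filter, List.mem_range]
  constructor
  · exact fun h => h.2
  · intro h
    refine ⟨lt_of_lt_of_le (Nat.lt_two_pow_self) (Nat.ge_two_pow_of_testBit h), h⟩

theorem pairwise_bitsOf (n : Nat) : (bitsOf n).Pairwise (· < ·) := by
  exact List.Pairwise.filter _ (List.pairwise_lt_range)

theorem sorted_nat_ext {l₁ l₂ : List Nat} (h₁ : l₁.Pairwise (· < ·)) (h₂ : l₂.Pairwise (· < ·))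
    (hm : ∀ x, x ∈ l₁ ↔ x ∈ l₂) : l₁ = l₂ := by
  have hp : l₁.Perm l₂ := by
    rw [List.perm_ext_iff_of_nodup
      (h₁.imp Nat.ne_of_lt) (h₂.imp Nat.ne_of_lt)]
    exact hm
  exact List.Perm.eq_of_pairwise (fun a b _ _ hab hba => le_antisymm hab hba)
    (h₁.imp le_of_lt) (h₂.imp le_of_lt) hp

theorem bitsOf_zero : bitsOf 0 = [] := rfl

-- peeling the lowest set bit
theorem bitsOf_cons {tmp k : Nat} (hb : tmp.testBit k = true)
    (hlow : ∀ j < k, tmp.testBit j = false) :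
    bitsOf tmp = k :: bitsOf (tmp ^^^ 2 ^ k) := by
  have htb : ∀ x, (tmp ^^^ 2 ^ k).testBit x = (tmp.testBit x ^^ decide (k = x)) := by
    intro x; simp [Nat.testBit_xor, Nat.testBit_two_pow]
  apply sorted_nat_ext (pairwise_bitsOf _)
  · rw [List.pairwise_cons]
    refine ⟨?_, pairwise_bitsOf _⟩
    intro x hx
    rw [mem_bitsOf, htb] at hx
    rcases lt_trichotomy x k with h | h | h
    · rw [hlow x h] at hx
      simp [Nat.ne_of_gt h] at hx
    · subst h; simp [hb] at hx
    · exact h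
  · intro x
    rw [mem_bitsOf, List.mem_cons, mem_bitsOf, htb]
    by_cases hxk : k = x
    · subst hxk; simp [hb]
    · simp [hxk, Ne.symm hxk]

theorem toNat_testBit {y : Int} (hy : 0 ≤ y) (i : Nat) : y.toNat.testBit i = y.testBit i := by
  cases y with
  | ofNat n => rfl
  | negSucc n => exact absurd hy (by simp)

theorem land_nonneg_ofNat (x : Int) (m : Nat) : 0 ≤ Int.land x (m : Nat) := by
  cases x with
  | ofNat n => exact Int.natCast_nonneg _
  | negSucc n => exact Int.natCast_nonneg _

theorem ldiff_one (m : Nat) : Nat.ldiff 1 m = if m.testBit 0 then 0 else 1 := by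
  by_cases h : m.testBit 0 <;>
  · apply Nat.eq_of_testBit_eq
    intro i
    cases i with
    | zero => rw [Nat.testBit_ldiff]; simp [h, Nat.testBit_zero]
    | succ i => rw [Nat.testBit_ldiff]; simp [Nat.testBit_add_one, h]

theorem pyBitTest_eq (x : Int) (b : Nat) : pyBitTest x (b : Int) = x.testBit b := by
  unfold pyBitTest
  rw [Int.toNat_natCast, Int.shiftRight_eq]
  cases x with
  | ofNat n =>
      show ((Int.ofNat ((n >>> b) &&& 1)) == 1) = n.testBit b
      have h1 : (n >>> b) &&& 1 = (n >>> b) % 2 := Nat.and_one_is_mod _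
      have h2 : n.testBit b = (n >>> b).testBit 0 := by
        simp
      rw [h1, h2, Nat.testBit_zero]
      rcases Nat.mod_two_eq_zero_or_one (n >>> b) with h | h <;> simp [h]
  | negSucc n =>
      show ((Int.ofNat (Nat.ldiff 1 (n >>> b))) == 1) = !n.testBit b
      have h2 : n.testBit b = (n >>> b).testBit 0 := by
        simp
      rw [ldiff_one, h2]
      by_cases h : (n >>> b).testBit 0 <;> simp [h]

theorem bitsOf_land (x : Int) (m : Nat) :
    bitsOf (Int.land x (m : Nat)).toNat = (bitsOf m).filter fun k => x.testBit k := by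
  apply sorted_nat_ext (pairwise_bitsOf _) (List.Pairwise.filter _ (pairwise_bitsOf _))
  intro i
  rw [mem_bitsOf, List.mem_filter, mem_bitsOf,
    toNat_testBit (land_nonneg_ofNat x m), Int.testBit_land]
  have : ((m : Nat) : Int).testBit i = m.testBit i := rfl
  rw [this]
  constructor
  · intro h; exact ⟨Bool.and_elim_right h, Bool.and_elim_left h⟩
  · intro ⟨h1, h2⟩; simp [h1, h2]

theorem bitsI_land (x : Int) (m : Nat) :
    bitsI (Int.land x (m : Nat)).toNat = (bitsI m).filter fun b => pyBitTest x b := by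
  unfold bitsI
  rw [bitsOf_land]
  generalize bitsOf m = l
  induction l with
  | nil => rfl
  | cons k l ih =>
      by_cases h : x.testBit k = true <;>
        simp [h, pyBitTest_eq, ih]

theorem combos_filter_all (p : Int → Bool) :
    ∀ (l : List Int) (k : Nat), (combosB k l).filter (fun c => c.all p) = combosB k (l.filter p) := by
  intro l
  induction l with
  | nil => intro k; cases k <;> simp [combosB]
  | cons x xs ih =>
      intro k
      cases k with
      | zero => simp [combosB]
      | succ k =>
          simp only [combosB, List.filter_append, List.filter_map]
          by_cases hx : p x = true
          · rw [List.filter_cons_of_pos hx]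
            simp only [combosB]
            congr 1
            · rw [← ih k]
              congr 1
              apply List.filter_congr
              intro c _
              simp [Function.comp, hx]
            · exact ih (k + 1)
          · rw [List.filter_cons_of_neg hx]
            have h0 : (List.filter ((fun c => c.all p) ∘ fun c => x :: c) (combosB k xs)) = [] := by
              apply List.filter_eq_nil_iff.mpr
              intro c _
              simp [Function.comp, hx]
            rw [h0]
            simpa using ih (k + 1)

-- the DFS over a candidate bitmask enumerates exactly the filtered combinations of its bit list
theorem pv_main (nbr : List Int) : ∀ n : Nat,
    (∀ (s : Nat) (path : List Int), s ≠ 0 →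
      loopA nbr (s : Int) path n =
        ((combosB s (bitsI n)).filter fun c => pairsOkB nbr c).map (path ++ ·)) ∧
    (∀ (s : Nat) (path : List Int),
      collectA nbr (s : Int) path n =
        ((combosB s (bitsI n)).filter fun c => pairsOkB nbr c).map (path ++ ·)) := by
  intro n
  induction n using Nat.strong_induction_on with
  | _ n IH =>
    have hloop : ∀ (s : Nat) (path : List Int), s ≠ 0 →
        loopA nbr (s : Int) path n =
          ((combosB s (bitsI n)).filter fun c => pairsOkB nbr c).map (path ++ ·) := by
      intro s path hs
      obtain ⟨s', rfl⟩ := Nat.exists_eq_succ_of_ne_zero hs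
      by_cases hn : n = 0
      · subst hn
        rw [loopA, dif_pos rfl]
        simp [bitsI, bitsOf_zero, combosB]
      · obtain ⟨k, hm, hb, hlow⟩ := pv_lsb_spec n hn
        have hlt' : n ^^^ 2 ^ k < n := by
          have := pv_xor_lsb_lt n hn
          rwa [hm] at this
        have hv : pyBitLength (2 ^ k) - 1 = k := by
          unfold pyBitLength
          simp [Nat.log2_two_pow]
        rw [loopA, dif_neg hn]
        simp only [hm, hv]
        have hsz : ((s' + 1 : Nat) : Int) - 1 = (s' : Int) := by push_cast; ring
        rw [hsz]
        set x : Int := (PySem.List.pyGet? nbr (k : Int)).getD 0 with hx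
        set tmp' : Nat := n ^^^ 2 ^ k with htmp'
        have hcand_le : (Int.land x (tmp' : Nat)).toNat ≤ tmp' := pv_land_toNat_le x tmp'
        -- recursive calls via strong IH
        rw [(IH _ (lt_of_le_of_lt hcand_le hlt')).2 s' (path ++ [(k : Int)])]
        rw [(IH tmp' hlt').1 (s' + 1) path (Nat.succ_ne_zero s')]
        -- right-hand side: peel the lowest bit
        have hbits : bitsI n = (k : Int) :: bitsI tmp' := by
          unfold bitsI
          rw [bitsOf_cons hb hlow]
          rfl
        rw [hbits]
        have hsplit : combosB (s' + 1) ((k : Int) :: bitsI tmp')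
            = ((combosB s' (bitsI tmp')).map fun c => (k : Int) :: c)
              ++ combosB (s' + 1) (bitsI tmp') := rfl
        rw [hsplit, List.filter_append, List.map_append]
        congr 1
        have hpair : ∀ c : List Int,
            pairsOkB nbr ((k : Int) :: c)
              = ((c.all fun b => pyBitTest x b) && pairsOkB nbr c) := fun c => rfl
        have h1 : ((combosB s' (bitsI tmp')).map fun c => (k : Int) :: c).filter
              (fun c => pairsOkB nbr c)
            = (((combosB s' (bitsI (Int.land x (tmp' : Nat)).toNat)).filter
                fun c => pairsOkB nbr c).map fun c => (k : Int) :: c) := by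
          rw [List.filter_map,
            List.filter_congr (q := fun c : List Int =>
              pairsOkB nbr c && (c.all fun b => pyBitTest x b))
              (fun c _ => by simp [Function.comp, hpair c, Bool.and_comm]),
            ← List.filter_filter, combos_filter_all, ← bitsI_land]
        rw [h1, List.map_map]
        congr 1
        funext c
        simp
    exact ⟨hloop, by
      intro s path
      cases s with
      | zero =>
          rw [collectA]
          simp [combosB, pairsOkB]
      | succ s' =>
          rw [collectA, if_neg (by exact_mod_cast Nat.succ_ne_zero s')]
          exact hloop (s' + 1) path (Nat.succ_ne_zero s')⟩

theorem bitsOf_ones (n : Nat) : bitsOf (2 ^ n - 1) = List.range n := by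
  apply sorted_nat_ext (pairwise_bitsOf _) (List.pairwise_lt_range)
  intro x
  rw [mem_bitsOf, Nat.testBit_two_pow_sub_one, List.mem_range]
  simp

theorem bitsI_ones (n : Nat) : bitsI (2 ^ n - 1) = (List.range n).map fun k : Nat => (k : Int) := by
  unfold bitsI
  rw [bitsOf_ones]

theorem combos_nil : ∀ (l : List Int) (k : Nat), l.length < k → combosB k l = [] := by
  intro l
  induction l with
  | nil => intro k hk; obtain ⟨k', rfl⟩ := Nat.exists_eq_succ_of_ne_zero (by omega : k ≠ 0); rfl
  | cons x xs ih =>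
      intro k hk
      obtain ⟨k', rfl⟩ := Nat.exists_eq_succ_of_ne_zero (by simp at hk; omega : k ≠ 0)
      simp only [combosB]
      rw [ih k' (by simpa using hk), ih (k' + 1) (by simp at hk; omega)]
      rfl

-- ===== VERDICT (by name: the statement is the Claim_ definition above) =====
theorem find_all_kt_py_spec : Claim_equal_find_all_kt_py := by
  intro t nbr N _ hpre
  obtain ⟨ht, hN, _⟩ := hpre
  unfold Spec_find_all_kt_py find_all_kt_py find_all_kt_py_alt
  obtain ⟨s, rfl⟩ := Int.eq_ofNat_of_zero_le ht
  rw [(pv_main nbr (2 ^ N.toNat - 1)).2 s []]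
  rw [PySem.List.pyRange_one, bitsI_ones]
  by_cases hNs : N < (s : Int)
  · rw [if_pos hNs, combos_nil _ _ (by simp; omega)]
    simp
  · rw [if_neg hNs]
    simp [Int.toNat_natCast]
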